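-- pv_equiv track=rewrite | github.com/Bilal-AYAKDAS/password_cracker | Yeni klasör/charecter_space.py | generate_combination
-- ===== SOURCE A (Python) =====
-- import string
--
-- CHARS = string.ascii_letters + string.digits
--
-- CHARSET_SIZE = len(CHARS)
--
-- def generate_combination(start, end, max_length):
--     for i in range(start, end):
--         password = []
--         temp = i
--         for _ in range(max_length):
--             password.append(CHARS[temp % CHARSET_SIZE])
--             temp //= CHARSET_SIZE
--         yield ''.join(password)
-- ===== SOURCE B (Python) =====
-- import string
--
-- CHARS = string.ascii_letters + string.digits
-- CHARSET_SIZE = len(CHARS)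
--
-- def generate_combination(start, end, max_length):
--     # odometer: keep a persistent LSB-first digit vector, advance it by +1 per yield
--     if end <= start:
--         return
--     L = max(max_length, 0)
--     digits = []
--     t = start
--     for _ in range(L):
--         digits.append(t % CHARSET_SIZE)
--         t //= CHARSET_SIZE
--     for _ in range(end - start):
--         yield ''.join(CHARS[d] for d in digits)
--         j = 0
--         while j < L:
--             digits[j] += 1
--             if digits[j] < CHARSET_SIZE:
--                 break
--             digits[j] = 0
--             j += 1
-- ===== Notes on version B (the rewrite author's own statement) =====
-- stated objective: alternative
-- what changed: B keeps a persistent LSB-first base-62 digit vector seeded once from start and advances it as an odometer (amortized O(1) carries per yield), instead of re-deriving every string from its index with max_length divmods.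
import Mathlib
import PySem

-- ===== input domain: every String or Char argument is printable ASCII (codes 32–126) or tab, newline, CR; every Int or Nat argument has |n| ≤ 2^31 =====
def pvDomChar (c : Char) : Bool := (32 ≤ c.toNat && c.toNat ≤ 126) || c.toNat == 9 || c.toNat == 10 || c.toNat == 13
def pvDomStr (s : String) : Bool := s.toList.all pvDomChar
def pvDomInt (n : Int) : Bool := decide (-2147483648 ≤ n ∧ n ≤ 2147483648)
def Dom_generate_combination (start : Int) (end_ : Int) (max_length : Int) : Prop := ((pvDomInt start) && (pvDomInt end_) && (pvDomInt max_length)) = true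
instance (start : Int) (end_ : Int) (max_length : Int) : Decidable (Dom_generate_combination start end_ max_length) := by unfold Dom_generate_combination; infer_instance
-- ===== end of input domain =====

-- B replaces per-index divmod derivation by a persistent odometer digit vector; objective: alternative decomposition.

-- ===== PORT A =====
-- CHARS = string.ascii_letters + string.digits
def pvChars : List Char := "abcdefghijklmnopqrstuvwxyzABCDEFGHIJKLMNOPQRSTUVWXYZ0123456789".toList

-- inner loop: for _ in range(max_length): password.append(CHARS[temp % 62]); temp //= 62
-- (append-loop as tail recursion with an accumulator, reversed at the end);
-- the index temp % 62 is always in [0, 62), so getD with a default is exact here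
def aInner : Int → Nat → List Char → List Char
  | _, 0, acc => acc.reverse
  | t, n + 1, acc =>
      aInner (PySem.Int.floordiv t 62) n (pvChars.getD (PySem.Int.mod t 62).toNat ' ' :: acc)

def generate_combination (start : Int) (end_ : Int) (max_length : Int) : List String :=
  (PySem.List.pyRange start end_ 1).map (fun i => String.ofList (aInner i max_length.toNat []))

-- ===== PORT B =====
-- seed the LSB-first digit vector from start (append loop, accumulator style)
def bSeed : Int → Nat → List Int → List Int
  | _, 0, acc => acc.reverse
  | t, n + 1, acc => bSeed (PySem.Int.floordiv t 62) n (PySem.Int.mod t 62 :: acc)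

-- odometer increment, carry truncated past the last digit
def bInc : List Int → List Int
  | [] => []
  | d :: ds => if d + 1 < 62 then (d + 1) :: ds else 0 :: bInc ds

def bJoin (ds : List Int) : String :=
  String.ofList (ds.map (fun d => pvChars.getD d.toNat ' '))

-- the yield loop: emit the current vector, then advance the odometer
def bEmit : List Int → Nat → List String → List String
  | _, 0, acc => acc.reverse
  | ds, k + 1, acc => bEmit (bInc ds) k (bJoin ds :: acc)

def generate_combination_alt (start : Int) (end_ : Int) (max_length : Int) : List String :=
  if end_ ≤ start then []
  else bEmit (bSeed start (max max_length 0).toNat []) (end_ - start).toNat []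

-- ===== PRECONDITION & SPEC =====
def Spec_generate_combination (start : Int) (end_ : Int) (max_length : Int) (out : List String) : Prop := out = generate_combination_alt start end_ max_length
instance (start : Int) (end_ : Int) (max_length : Int) (out : List String) : Decidable (Spec_generate_combination start end_ max_length out) := by unfold Spec_generate_combination; infer_instance

-- ===== CLAIM (what is proved, stated in full; the proofs are below) =====
def Claim_equal_generate_combination : Prop := ∀ (start : Int) (end_ : Int) (max_length : Int), Dom_generate_combination start end_ max_length → Spec_generate_combination start end_ max_length (generate_combination start end_ max_length)

-- ===== LEMMAS AND PROOFS =====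

-- simple (non-accumulator) reference versions of the three loops, used only in the proofs
def aInnerS : Int → Nat → List Char
  | _, 0 => []
  | t, n + 1 => pvChars.getD (PySem.Int.mod t 62).toNat ' ' :: aInnerS (PySem.Int.floordiv t 62) n

def bSeedS : Int → Nat → List Int
  | _, 0 => []
  | t, n + 1 => PySem.Int.mod t 62 :: bSeedS (PySem.Int.floordiv t 62) n

def bEmitS : List Int → Nat → List String
  | _, 0 => []
  | ds, k + 1 => bJoin ds :: bEmitS (bInc ds) k

theorem aInner_eq (n : Nat) : ∀ t acc, aInner t n acc = acc.reverse ++ aInnerS t n := by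
  induction n with
  | zero => intro t acc; simp [aInner, aInnerS]
  | succ n ih => intro t acc; simp [aInner, aInnerS, ih]

theorem bSeed_eq (n : Nat) : ∀ t acc, bSeed t n acc = acc.reverse ++ bSeedS t n := by
  induction n with
  | zero => intro t acc; simp [bSeed, bSeedS]
  | succ n ih => intro t acc; simp [bSeed, bSeedS, ih]

theorem bEmit_eq (k : Nat) : ∀ ds acc, bEmit ds k acc = acc.reverse ++ bEmitS ds k := by
  induction k with
  | zero => intro ds acc; simp [bEmit, bEmitS]
  | succ k ih => intro ds acc; simp [bEmit, bEmitS, ih]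

-- advancing the seed: incrementing the odometer is seeding from t+1
theorem bInc_bSeedS (n : Nat) : ∀ t : Int, bInc (bSeedS t n) = bSeedS (t + 1) n := by
  induction n with
  | zero => intro t; rfl
  | succ n ih =>
    intro t
    simp only [bSeedS, bInc, PySem.Int.mod_eq_emod_of_pos (a := t) (b := 62) (by norm_num),
      PySem.Int.mod_eq_emod_of_pos (a := t + 1) (b := 62) (by norm_num),
      PySem.Int.floordiv_eq_ediv_of_pos (a := t) (b := 62) (by norm_num),
      PySem.Int.floordiv_eq_ediv_of_pos (a := t + 1) (b := 62) (by norm_num)]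
    by_cases h : t % 62 + 1 < 62
    · rw [if_pos h]
      have h1 : (t + 1) % 62 = t % 62 + 1 := by omega
      have h2 : (t + 1) / 62 = t / 62 := by omega
      rw [h1, h2]
    · rw [if_neg h]
      have h1 : (t + 1) % 62 = 0 := by omega
      have h2 : (t + 1) / 62 = t / 62 + 1 := by omega
      rw [h1, h2, ih]

-- per-string: A's char list is the mapped digit vector
theorem aInnerS_eq_map (n : Nat) : ∀ t : Int,
    aInnerS t n = (bSeedS t n).map (fun d => pvChars.getD d.toNat ' ') := by
  induction n with
  | zero => intro t; rfl
  | succ n ih => intro t; simp [aInnerS, bSeedS, ih]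

theorem map_range_eq_emit (L : Nat) (k : Nat) : ∀ s : Int,
    (PySem.List.pyRange s (s + k) 1).map (fun i => String.ofList (aInnerS i L)) =
      bEmitS (bSeedS s L) k := by
  induction k with
  | zero => intro s; simp [PySem.List.pyRange_one_eq_nil le_rfl, bEmitS]
  | succ k ih =>
    intro s
    rw [PySem.List.pyRange_one_cons (by omega)]
    have : s + (k + 1 : Nat) = (s + 1) + (k : Nat) := by push_cast; ring
    rw [this]
    simp only [List.map_cons, bEmitS]
    rw [ih (s + 1)]
    simp only [bInc_bSeedS, bJoin, aInnerS_eq_map]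

-- ===== VERDICT (by name: the statement is the Claim_ definition above) =====
theorem generate_combination_spec : Claim_equal_generate_combination := by
  intro s e m _
  unfold Spec_generate_combination generate_combination generate_combination_alt
  have hL : (max m 0).toNat = m.toNat := by omega
  by_cases h : e ≤ s
  · rw [if_pos h, PySem.List.pyRange_one_eq_nil h]; rfl
  · rw [if_neg h]
    simp only [hL, aInner_eq, bSeed_eq, bEmit_eq, List.reverse_nil, List.nil_append]
    have he : e = s + ((e - s).toNat : Int) := by omega
    have key := map_range_eq_emit m.toNat (e - s).toNat s
    rw [← he] at key
    exact key
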